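-- pv_equiv track=rewrite | github.com/kojiboji/cs221 | burrows_wheeler_transform.py | efficient_bw_matching
-- ===== SOURCE A (Python) =====
-- def efficient_bw_matching(fo, bwt, clone, partial_sa, k, checkpoint, c):
--   pattern = [i for i in clone]
--   top = 0
--   bottom = len(bwt) - 1
--   while top <= bottom:
--     if pattern:
--       symbol = pattern[-1]
--       pattern.pop()
--       top = fo[symbol] + getCount(symbol, top, checkpoint, c, bwt)
--       bottom = fo[symbol] + getCount(symbol, bottom+1, checkpoint, c, bwt) - 1
--     else:
--       positions = []
--       for i in range(top,bottom+1):
--         offset = 0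
--         while(True):
--           if i in partial_sa.keys():
--             positions.append(partial_sa[i] + offset)
--             break
--           else:
--             symbol = bwt[i]
--             offset += 1
--             occurence = getCount(symbol, i+1,checkpoint, c, bwt)
--             i = fo[symbol] + occurence - 1
--
--       return positions
--   return None
--
-- def getCount(symbol, place, checkpoint, c, bwt):
--   last_checkpoint = int(place/c)
--   count = checkpoint[symbol][last_checkpoint]
--
--   for i in range(last_checkpoint*c, place):
--     if bwt[i] == symbol:
--       count += 1
--   return count
-- ===== SOURCE B (Python) =====
-- def efficient_bw_matching(fo, bwt, clone, partial_sa, k, checkpoint, c):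
--   # Phase 1: narrow (top, bottom) over reversed(clone); ranks come straight from
--   # prefix counts of bwt, the checkpoint table is not consulted at all.
--   top, bottom = 0, len(bwt) - 1
--   for symbol in reversed(clone):
--     if top > bottom:
--       break
--     first = fo[symbol]
--     top = first + bwt[:top].count(symbol)
--     bottom = first + bwt[:bottom + 1].count(symbol) - 1
--   if top > bottom:
--     return None
--   # Phase 2: locate each surviving row by a recursive LF-walk.
--   return [locate(i, fo, bwt, partial_sa) for i in range(top, bottom + 1)]
--
-- def locate(i, fo, bwt, partial_sa):
--   if i in partial_sa:
--     return partial_sa[i]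
--   symbol = bwt[i]
--   return 1 + locate(fo[symbol] + bwt[:i + 1].count(symbol) - 1, fo, bwt, partial_sa)
-- ===== Notes on version B (the rewrite author's own statement) =====
-- stated objective: alternative
-- what changed: A's single interleaved 'while top <= bottom' loop with checkpoint-table rank lookups (getCount) and an offset-accumulating inner LF-walk is replaced by two explicit phases that never consult the checkpoint table: a fold over reversed(clone) narrowing (top, bottom) with ranks computed directly as bwt[:place].count(symbol), then a comprehension locating each row by a recursive 1 + locate(...) LF-walk; equal because Pre_ requires the checkpoint table to hold the genuine prefix counts of bwt.
-- outside the precondition, e.g. on efficient_bw_matching({'a': 5}, 'ba', 'a', {}, 0, {'a': [0, 0, 0]}, 1): A returns None, B raises IndexError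
import Mathlib
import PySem

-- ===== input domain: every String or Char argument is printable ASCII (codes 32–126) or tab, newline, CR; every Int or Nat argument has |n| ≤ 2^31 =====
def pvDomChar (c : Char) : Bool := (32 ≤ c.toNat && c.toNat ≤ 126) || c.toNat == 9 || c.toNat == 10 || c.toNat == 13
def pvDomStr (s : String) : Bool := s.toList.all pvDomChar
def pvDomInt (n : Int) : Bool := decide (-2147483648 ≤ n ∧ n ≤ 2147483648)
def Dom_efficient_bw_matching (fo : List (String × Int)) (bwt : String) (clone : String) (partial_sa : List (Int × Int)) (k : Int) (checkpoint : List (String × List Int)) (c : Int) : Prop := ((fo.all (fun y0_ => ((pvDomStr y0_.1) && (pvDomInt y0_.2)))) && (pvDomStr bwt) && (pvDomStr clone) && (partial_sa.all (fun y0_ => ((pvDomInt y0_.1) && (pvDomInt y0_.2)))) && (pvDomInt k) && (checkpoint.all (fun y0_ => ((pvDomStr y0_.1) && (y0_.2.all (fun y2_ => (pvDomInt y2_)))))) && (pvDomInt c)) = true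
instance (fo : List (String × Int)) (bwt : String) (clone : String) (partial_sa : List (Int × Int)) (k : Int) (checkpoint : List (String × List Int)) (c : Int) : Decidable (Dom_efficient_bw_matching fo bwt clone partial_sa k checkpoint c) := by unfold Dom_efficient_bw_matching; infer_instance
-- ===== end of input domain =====

-- B replaces A's single interleaved while-loop and its checkpoint-table rank helper (getCount) by two
-- explicit phases that never consult the checkpoint table: a fold over reversed(clone) narrowing
-- (top,bottom) with ranks taken directly as prefix counts of bwt, then a recursive LF-walk per row.
-- Objective 'alternative' (same task, different algorithmic machinery). Return-value equivalence only.

-- fuel for the LF-walks: Python diverges where it runs out; those inputs are outside Pre_.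
def pvFuel (bwt : List Char) (partial_sa : List (Int × Int)) : Nat := bwt.length + partial_sa.length + 1

-- ===== PORT A =====
-- getCount: A's checkpoint-table rank helper. int(place/c) is truncating division
-- (PySem.Int.truncdiv, exact for |place|,|c| < 2^53; c = 0 would raise ZeroDivisionError in Python —
-- outside Pre_). Dict/list lookups that would raise KeyError/IndexError get defaults; outside Pre_.
def pvGetCount (symbol : Char) (place : Int) (checkpoint : List (String × List Int)) (c : Int) (bwt : List Char) : Int :=
  let last_checkpoint : Int := PySem.Int.truncdiv place c
  let count : Int := PySem.List.pyGetD ((PySem.Dict.ofList checkpoint).getD (String.ofList [symbol]) []) last_checkpoint 0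
  (PySem.List.pyRange (last_checkpoint * c) place 1).foldl
    (fun cnt i => if PySem.List.pyGetD bwt i (Char.ofNat 0) == symbol then cnt + 1 else cnt) count

-- A's inner 'while True' walk, with its running 'offset' accumulator.
def pvWalkA (fo : List (String × Int)) (bwt : List Char) (partial_sa : List (Int × Int)) (checkpoint : List (String × List Int)) (c : Int) : Nat → Int → Int → Int
  | 0, _, offset => offset
  | fuel + 1, i, offset =>
    match (PySem.Dict.ofList partial_sa).get? i with
    | some v => v + offset
    | none =>
      let symbol := PySem.List.pyGetD bwt i (Char.ofNat 0)
      let occurence := pvGetCount symbol (i + 1) checkpoint c bwt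
      pvWalkA fo bwt partial_sa checkpoint c fuel ((PySem.Dict.ofList fo).getD (String.ofList [symbol]) 0 + occurence - 1) (offset + 1)

-- A's 'while top <= bottom' loop over the mutable pattern list (pop from the end).
def pvLoopA (fo : List (String × Int)) (bwt : List Char) (partial_sa : List (Int × Int)) (checkpoint : List (String × List Int)) (c : Int) (pattern : List Char) (top bottom : Int) : Option (List Int) :=
  if top ≤ bottom then
    match h : pattern.getLast? with
    | some symbol =>
      pvLoopA fo bwt partial_sa checkpoint c pattern.dropLast
        ((PySem.Dict.ofList fo).getD (String.ofList [symbol]) 0 + pvGetCount symbol top checkpoint c bwt)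
        ((PySem.Dict.ofList fo).getD (String.ofList [symbol]) 0 + pvGetCount symbol (bottom + 1) checkpoint c bwt - 1)
    | none =>
      some ((PySem.List.pyRange top (bottom + 1) 1).foldl
        (fun positions i => positions ++ [pvWalkA fo bwt partial_sa checkpoint c (pvFuel bwt partial_sa) i 0]) [])
  else none
termination_by pattern.length
decreasing_by
  have hne : pattern ≠ [] := by intro e; subst e; simp at h
  have := List.length_pos_iff.mpr hne
  simp only [List.length_dropLast]; omega

def efficient_bw_matching (fo : List (String × Int)) (bwt : String) (clone : String) (partial_sa : List (Int × Int)) (k : Int) (checkpoint : List (String × List Int)) (c : Int) : Option (List Int) :=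
  pvLoopA fo bwt.toList partial_sa checkpoint c clone.toList 0 ((bwt.toList.length : Int) - 1)

-- ===== PORT B =====
-- B's rank: bwt[:place].count(symbol) — a direct prefix count, no checkpoint table.
def pvRankB (bwt : List Char) (place : Int) (symbol : Char) : Int :=
  ((PySem.List.slice bwt none (some place)).count symbol : Int)

-- B's recursive LF-walk 'locate' (1 + recursive call, no offset accumulator).
def pvLocateB (fo : List (String × Int)) (bwt : List Char) (partial_sa : List (Int × Int)) : Nat → Int → Int
  | 0, _ => 0
  | fuel + 1, i =>
    match (PySem.Dict.ofList partial_sa).get? i with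
    | some v => v
    | none =>
      let symbol := PySem.List.pyGetD bwt i (Char.ofNat 0)
      1 + pvLocateB fo bwt partial_sa fuel
            ((PySem.Dict.ofList fo).getD (String.ofList [symbol]) 0 + pvRankB bwt (i + 1) symbol - 1)

-- B's phase 1: fold over reversed(clone), early break when the range is empty.
def pvNarrowB (fo : List (String × Int)) (bwt : List Char) : List Char → Int × Int → Int × Int
  | [], tb => tb
  | symbol :: rest, (top, bottom) =>
    if top > bottom then (top, bottom)
    else
      let first := (PySem.Dict.ofList fo).getD (String.ofList [symbol]) 0
      pvNarrowB fo bwt rest (first + pvRankB bwt top symbol, first + pvRankB bwt (bottom + 1) symbol - 1)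

def efficient_bw_matching_alt (fo : List (String × Int)) (bwt : String) (clone : String) (partial_sa : List (Int × Int)) (k : Int) (checkpoint : List (String × List Int)) (c : Int) : Option (List Int) :=
  let tb := pvNarrowB fo bwt.toList clone.toList.reverse (0, (bwt.toList.length : Int) - 1)
  if tb.1 > tb.2 then none
  else some ((PySem.List.pyRange tb.1 (tb.2 + 1) 1).map
    (fun i => pvLocateB fo bwt.toList partial_sa (pvFuel bwt.toList partial_sa) i))

-- ===== PRECONDITION & SPEC =====
-- one LF step, written directly from the input data (used only inside Pre_'s termination clause)
def pvLFstep (fo : List (String × Int)) (bwt : List Char) (i : Int) : Int :=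
  let s := bwt.getD i.toNat (Char.ofNat 0)
  (PySem.Dict.ofList fo).getD (String.ofList [s]) 0 + ((bwt.take (i.toNat + 1)).count s : Int) - 1

-- Pre_ = inputs on which Python A returns normally: either bwt is empty (A returns None untouched),
-- or the FM-index data is well formed — c ≥ 1; every symbol of clone and of bwt is keyed in fo and
-- checkpoint with 0 ≤ fo[s], fo[s] + count(s) ≤ n and checkpoint[s] holding the genuine prefix counts
-- of bwt (so every index A touches is in range) — and every LF-orbit reaches a partial_sa key within
-- n steps (otherwise A's inner 'while True' walk never terminates). A genuinely partial suffix array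
-- is admitted. Pre_ is sufficient, not exact: it excludes some malformed inputs on which A happens to
-- return None because the very first narrowing step already empties the range.
def Pre_efficient_bw_matching (fo : List (String × Int)) (bwt : String) (clone : String) (partial_sa : List (Int × Int)) (k : Int) (checkpoint : List (String × List Int)) (c : Int) : Prop :=
  bwt = "" ∨
  (1 ≤ c ∧
   ((clone.toList ++ bwt.toList).all (fun s =>
      let key := String.ofList [s]
      let n := bwt.toList.length
      let cl := (PySem.Dict.ofList checkpoint).getD key []
      (PySem.Dict.ofList fo).contains key &&
      decide (0 ≤ (PySem.Dict.ofList fo).getD key 0) &&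
      decide ((PySem.Dict.ofList fo).getD key 0 + (bwt.toList.count s : Int) ≤ (n : Int)) &&
      decide (n / c.toNat + 1 ≤ cl.length) &&
      (List.range (n / c.toNat + 1)).all (fun j =>
        decide (cl.getD j 0 = ((bwt.toList.take (j * c.toNat)).count s : Int)))) = true) ∧
   ((List.range bwt.toList.length).all (fun i =>
      (List.range (bwt.toList.length + 1)).any (fun j =>
        (PySem.Dict.ofList partial_sa).contains ((pvLFstep fo bwt.toList)^[j] (i : Int)))) = true))
instance (fo : List (String × Int)) (bwt : String) (clone : String) (partial_sa : List (Int × Int)) (k : Int) (checkpoint : List (String × List Int)) (c : Int) : Decidable (Pre_efficient_bw_matching fo bwt clone partial_sa k checkpoint c) := by unfold Pre_efficient_bw_matching; infer_instance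

def pvWitness_efficient_bw_matching : (List (String × Int)) × String × String × (List (Int × Int)) × Int × (List (String × List Int)) × Int :=
  ([("$", 0), ("a", 1), ("b", 2)], "b$a", "b", [(1, 0)], 0,
   [("$", [0, 0, 1, 1]), ("a", [0, 0, 0, 1]), ("b", [0, 1, 1, 1])], 1)

def Spec_efficient_bw_matching (fo : List (String × Int)) (bwt : String) (clone : String) (partial_sa : List (Int × Int)) (k : Int) (checkpoint : List (String × List Int)) (c : Int) (out : Option (List Int)) : Prop := out = efficient_bw_matching_alt fo bwt clone partial_sa k checkpoint c
instance (fo : List (String × Int)) (bwt : String) (clone : String) (partial_sa : List (Int × Int)) (k : Int) (checkpoint : List (String × List Int)) (c : Int) (out : Option (List Int)) : Decidable (Spec_efficient_bw_matching fo bwt clone partial_sa k checkpoint c out) := by unfold Spec_efficient_bw_matching; infer_instance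

-- ===== CLAIM (what is proved, stated in full; the proofs are below) =====
def Claim_equal_efficient_bw_matching : Prop := ∀ (fo : List (String × Int)) (bwt : String) (clone : String) (partial_sa : List (Int × Int)) (k : Int) (checkpoint : List (String × List Int)) (c : Int), Dom_efficient_bw_matching fo bwt clone partial_sa k checkpoint c → Pre_efficient_bw_matching fo bwt clone partial_sa k checkpoint c → Spec_efficient_bw_matching fo bwt clone partial_sa k checkpoint c (efficient_bw_matching fo bwt clone partial_sa k checkpoint c)

-- ===== LEMMAS AND PROOFS =====

-- well-formedness of one symbol's FM-index data (extracted from Pre_'s .all clause)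
def pvGood (fo : List (String × Int)) (bwt : List Char) (checkpoint : List (String × List Int)) (c : Int) (s : Char) : Prop :=
  0 ≤ (PySem.Dict.ofList fo).getD (String.ofList [s]) 0 ∧
  (PySem.Dict.ofList fo).getD (String.ofList [s]) 0 + (bwt.count s : Int) ≤ (bwt.length : Int) ∧
  bwt.length / c.toNat + 1 ≤ ((PySem.Dict.ofList checkpoint).getD (String.ofList [s]) []).length ∧
  ∀ j < bwt.length / c.toNat + 1,
    ((PySem.Dict.ofList checkpoint).getD (String.ofList [s]) []).getD j 0 = ((bwt.take (j * c.toNat)).count s : Int)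

-- counting fold over an index range = count on the corresponding segment of bwt
theorem pvFoldCount (bwt : List Char) (s : Char) {a b : Int} (kk : Int) (h0 : 0 ≤ a) (hab : a ≤ b) (hbn : b ≤ (bwt.length : Int)) :
    (PySem.List.pyRange a b 1).foldl
      (fun cnt i => if PySem.List.pyGetD bwt i (Char.ofNat 0) == s then cnt + 1 else cnt) kk
    = kk + (((bwt.take b.toNat).drop a.toNat).count s : Int) := by
  set xs := bwt.take b.toNat with hxs
  have hxlen : (PySem.List.len xs) = b := by
    simp [PySem.List.len_eq, hxs, List.length_take]
    omega
  have hcong : (PySem.List.pyRange a b 1).foldl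
      (fun cnt i => if PySem.List.pyGetD bwt i (Char.ofNat 0) == s then cnt + 1 else cnt) kk
    = (PySem.List.pyRange a b 1).foldl
      (fun cnt i => if PySem.List.pyGetD xs i (Char.ofNat 0) == s then cnt + 1 else cnt) kk := by
    apply PySem.List.foldl_congr_mem
    intro acc i hi
    rw [PySem.List.mem_pyRange_one] at hi
    have h1 : 0 ≤ i := le_trans h0 hi.1
    have h2 : i < (xs.length : Int) := by
      have : (xs.length : Int) = b := by simpa [PySem.List.len_eq] using hxlen
      omega
    have h3 : i < (bwt.length : Int) := by omega
    rw [PySem.List.pyGetD_eq_getElem bwt (Char.ofNat 0) h1 h3,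
        PySem.List.pyGetD_eq_getElem xs (Char.ofNat 0) h1 h2]
    have h4 : i.toNat < xs.length := by omega
    have := List.getElem_take (xs := bwt) (h := h4)
    simp only [hxs] at *
    rw [this]
  rw [hcong]
  have := PySem.List.foldl_pyRange_pyGetD xs (Char.ofNat 0)
    (fun acc x => if x == s then acc + 1 else acc) kk h0
  rw [hxlen] at this
  rw [this, PySem.List.foldl_beq_add_one]

-- under genuine checkpoint data, A's getCount is B's direct prefix count
theorem pvGetCount_eq (fo : List (String × Int)) (bwt : List Char) (checkpoint : List (String × List Int)) (c : Int) (s : Char)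
    (hc : 1 ≤ c) (hg : pvGood fo bwt checkpoint c s) {place : Int} (h0 : 0 ≤ place) (hn : place ≤ (bwt.length : Int)) :
    pvGetCount s place checkpoint c bwt = ((bwt.take place.toNat).count s : Int) := by
  obtain ⟨-, -, hlen, hck⟩ := hg
  simp only [pvGetCount]
  have hp : place = ((place.toNat : Nat) : Int) := by omega
  have hcnat : c = ((c.toNat : Nat) : Int) := by omega
  set p := place.toNat with hpdef
  set m := c.toNat with hmdef
  have hm1 : 1 ≤ m := by omega
  have htr : PySem.Int.truncdiv place c = ((p / m : Nat) : Int) := by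
    rw [hp, hcnat]; simp [PySem.Int.truncdiv]
  set q := p / m with hqdef
  have hq : q < bwt.length / m + 1 := by
    have : p ≤ bwt.length := by omega
    have := Nat.div_le_div_right (c := m) this
    omega
  have hgetD : PySem.List.pyGetD ((PySem.Dict.ofList checkpoint).getD (String.ofList [s]) []) ((q : Nat) : Int) 0
      = ((bwt.take (q * m)).count s : Int) := by
    rw [PySem.List.pyGetD_natCast]
    exact hck q hq
  rw [htr]
  simp only [hgetD]
  have hqm_le_p : q * m ≤ p := Nat.div_mul_le_self p m
  have hfold := pvFoldCount bwt s (a := ((q * m : Nat) : Int)) (b := place)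
    ((bwt.take (q * m)).count s : Int) (by positivity) (by omega) hn
  have hcast : ((q : Int)) * c = ((q * m : Nat) : Int) := by rw [hcnat]; push_cast; ring
  rw [hcast, hfold]
  simp only [Int.toNat_natCast, ← hpdef]
  have hsplit : (bwt.take p).count s = (bwt.take (q * m)).count s + ((bwt.take p).drop (q * m)).count s := by
    conv_lhs => rw [← List.take_append_drop (q * m) (bwt.take p)]
    rw [List.count_append, List.take_take, min_eq_left hqm_le_p]
  omega

-- B's rank is a prefix count
theorem pvRankB_eq (bwt : List Char) (s : Char) {place : Int} (h0 : 0 ≤ place) :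
    pvRankB bwt place s = ((bwt.take place.toNat).count s : Int) := by
  simp [pvRankB, PySem.List.slice_to bwt h0]

-- A's accumulator walk is B's recursive walk plus the offset (both stay inside [0, n))
theorem pvWalkA_eq (fo : List (String × Int)) (bwt : List Char) (partial_sa : List (Int × Int)) (checkpoint : List (String × List Int)) (c : Int)
    (hc : 1 ≤ c) (hgood : ∀ s ∈ bwt, pvGood fo bwt checkpoint c s) (fuel : Nat) :
    ∀ (i offset : Int), 0 ≤ i → i < (bwt.length : Int) →
      pvWalkA fo bwt partial_sa checkpoint c fuel i offset = offset + pvLocateB fo bwt partial_sa fuel i := by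
  induction fuel with
  | zero => intro i offset _ _; simp [pvWalkA, pvLocateB]
  | succ fuel ih =>
    intro i offset h0 hn
    simp only [pvWalkA, pvLocateB]
    cases (PySem.Dict.ofList partial_sa).get? i with
    | some v => simp; omega
    | none =>
      simp only []
      have hidx : i.toNat < bwt.length := by omega
      have hsym : PySem.List.pyGetD bwt i (Char.ofNat 0) = bwt[i.toNat] :=
        PySem.List.pyGetD_eq_getElem bwt (Char.ofNat 0) h0 hn
      have hmem : bwt[i.toNat] ∈ bwt := List.getElem_mem hidx
      have hg := hgood _ hmem
      have hcnt : pvGetCount (bwt[i.toNat]) (i + 1) checkpoint c bwt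
          = ((bwt.take (i + 1).toNat).count (bwt[i.toNat]) : Int) :=
        pvGetCount_eq fo bwt checkpoint c _ hc hg (by omega) (by omega)
      have hrank : pvRankB bwt (i + 1) (bwt[i.toNat]) = ((bwt.take (i + 1).toNat).count (bwt[i.toNat]) : Int) :=
        pvRankB_eq bwt _ (by omega)
      have htn : (i + 1).toNat = i.toNat + 1 := by omega
      have hpos : 1 ≤ (bwt.take (i.toNat + 1)).count (bwt[i.toNat]) := by
        have hlt : i.toNat < (bwt.take (i.toNat + 1)).length := by
          simp [List.length_take]; omega
        have : (bwt.take (i.toNat + 1))[i.toNat] = bwt[i.toNat] := List.getElem_take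
        have hmem' : bwt[i.toNat] ∈ bwt.take (i.toNat + 1) := by
          rw [← this]; exact List.getElem_mem hlt
        exact List.count_pos_iff.mpr hmem'
      have hle : (bwt.take (i.toNat + 1)).count (bwt[i.toNat]) ≤ bwt.count (bwt[i.toNat]) :=
        (List.take_sublist _ _).count_le _
      obtain ⟨hfo0, hfon, -, -⟩ := hg
      rw [hsym, hcnt, hrank, htn]
      rw [ih _ (offset + 1) (by omega) (by omega)]
      omega

-- early break: an empty range is left untouched by B's narrowing fold
theorem pvNarrowB_stop (fo : List (String × Int)) (bwt : List Char) (rev : List Char) {top bottom : Int} (h : top > bottom) :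
    pvNarrowB fo bwt rev (top, bottom) = (top, bottom) := by
  cases rev with
  | nil => rfl
  | cons s rest => simp [pvNarrowB, h]

-- A's single while-loop, run on rev.reverse, is B's two phases run on rev
theorem pvLoopA_eq (fo : List (String × Int)) (bwt : List Char) (partial_sa : List (Int × Int)) (checkpoint : List (String × List Int)) (c : Int)
    (hc : 1 ≤ c) (hgood : ∀ s ∈ bwt, pvGood fo bwt checkpoint c s) :
    ∀ (rev : List Char) (top bottom : Int), (∀ s ∈ rev, pvGood fo bwt checkpoint c s) →
      0 ≤ top → top ≤ (bwt.length : Int) → 0 ≤ bottom + 1 → bottom + 1 ≤ (bwt.length : Int) →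
      pvLoopA fo bwt partial_sa checkpoint c rev.reverse top bottom =
        (let tb := pvNarrowB fo bwt rev (top, bottom)
         if tb.1 > tb.2 then none
         else some ((PySem.List.pyRange tb.1 (tb.2 + 1) 1).map
           (fun i => pvLocateB fo bwt partial_sa (pvFuel bwt partial_sa) i))) := by
  intro rev
  induction rev with
  | nil =>
    intro top bottom _ ht0 htn hb0 hbn
    rw [pvLoopA]
    simp only [List.reverse_nil, List.getLast?_nil, pvNarrowB]
    by_cases h : top ≤ bottom
    · simp only [if_pos h, if_neg (by omega : ¬ top > bottom)]
      rw [PySem.List.foldl_append_singleton_eq_map]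
      simp only [List.nil_append, Option.some.injEq]
      apply List.map_congr_left
      intro i hi
      rw [PySem.List.mem_pyRange_one] at hi
      have := pvWalkA_eq fo bwt partial_sa checkpoint c hc hgood (pvFuel bwt partial_sa) i 0
        (by omega) (by omega)
      omega
    · simp [if_neg h, if_pos (by omega : top > bottom)]
  | cons s rest ih =>
    intro top bottom hrev ht0 htn hb0 hbn
    have hgs : pvGood fo bwt checkpoint c s := hrev s (by simp)
    rw [show (s :: rest).reverse = rest.reverse ++ [s] by simp, pvLoopA]
    by_cases h : top ≤ bottom
    · simp only [if_pos h, pvNarrowB, if_neg (by omega : ¬ top > bottom)]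
      split
      · rename_i symbol hsym
        rw [List.getLast?_concat] at hsym
        injection hsym with hs; subst hs
        simp only [List.dropLast_concat]
        have hct : pvGetCount s top checkpoint c bwt = ((bwt.take top.toNat).count s : Int) :=
          pvGetCount_eq fo bwt checkpoint c s hc hgs ht0 htn
        have hcb : pvGetCount s (bottom + 1) checkpoint c bwt = ((bwt.take (bottom + 1).toNat).count s : Int) :=
          pvGetCount_eq fo bwt checkpoint c s hc hgs hb0 hbn
        have hrt : pvRankB bwt top s = ((bwt.take top.toNat).count s : Int) := pvRankB_eq bwt s ht0
        have hrb : pvRankB bwt (bottom + 1) s = ((bwt.take (bottom + 1).toNat).count s : Int) := pvRankB_eq bwt s hb0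
        obtain ⟨hfo0, hfon, -, -⟩ := hgs
        have hct_le : ((bwt.take top.toNat).count s : Int) ≤ (bwt.count s : Int) := by
          exact_mod_cast (List.take_sublist _ _).count_le s
        have hcb_le : ((bwt.take (bottom + 1).toNat).count s : Int) ≤ (bwt.count s : Int) := by
          exact_mod_cast (List.take_sublist _ _).count_le s
        rw [hct, hcb, ih _ _ (fun x hx => hrev x (by simp [hx]))
          (by omega) (by omega) (by omega) (by omega)]
        rw [hrt, hrb]
      · rename_i hnone
        rw [List.getLast?_concat] at hnone; cases hnone
    · simp only [if_neg h]
      rw [pvNarrowB_stop fo bwt (s :: rest) (by omega : top > bottom)]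
      simp [show top > bottom by omega]

-- Pre_'s .all clause really says pvGood (plus fo-membership, unused in the equivalence)
theorem pre_extract (fo : List (String × Int)) (bwt : String) (clone : String) (checkpoint : List (String × List Int)) (c : Int)
    (h : ((clone.toList ++ bwt.toList).all (fun s =>
      let key := String.ofList [s]
      let n := bwt.toList.length
      let cl := (PySem.Dict.ofList checkpoint).getD key []
      (PySem.Dict.ofList fo).contains key &&
      decide (0 ≤ (PySem.Dict.ofList fo).getD key 0) &&
      decide ((PySem.Dict.ofList fo).getD key 0 + (bwt.toList.count s : Int) ≤ (n : Int)) &&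
      decide (n / c.toNat + 1 ≤ cl.length) &&
      (List.range (n / c.toNat + 1)).all (fun j =>
        decide (cl.getD j 0 = ((bwt.toList.take (j * c.toNat)).count s : Int)))) = true)) :
    ∀ s ∈ clone.toList ++ bwt.toList, pvGood fo bwt.toList checkpoint c s := by
  intro s hs
  have := (List.all_eq_true.mp h) s hs
  simp only [Bool.and_eq_true, decide_eq_true_eq, List.all_eq_true, List.mem_range] at this
  obtain ⟨⟨⟨⟨-, h1⟩, h2⟩, h3⟩, h4⟩ := this
  exact ⟨h1, h2, h3, fun j hj => h4 j hj⟩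

-- ===== VERDICT (by name: the statement is the Claim_ definition above) =====
theorem efficient_bw_matching_spec : Claim_equal_efficient_bw_matching := by
  intro fo bwt clone partial_sa k checkpoint c _hdom hpre
  show _ = _
  unfold efficient_bw_matching efficient_bw_matching_alt
  rcases hpre with hempty | ⟨hc, hall, -⟩
  · subst hempty
    rw [pvLoopA]
    simp only [String.toList_empty, List.length_nil]
    rw [pvNarrowB_stop fo [] _ (by norm_num)]
    norm_num
  · have hgood := pre_extract fo bwt clone checkpoint c hall
    have h := pvLoopA_eq fo bwt.toList partial_sa checkpoint c hc
      (fun s hs => hgood s (List.mem_append_right _ hs))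
      clone.toList.reverse 0 ((bwt.toList.length : Int) - 1)
      (fun s hs => hgood s (List.mem_append_left _ (List.mem_reverse.mp hs)))
      le_rfl (by omega) (by omega) (by omega)
    rw [List.reverse_reverse] at h
    rw [h]
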